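-- pv_equiv track=rewrite | github.com/redavoeigor/task-tracker-cli-solution | utils.py | delete_task_by_id
-- ===== SOURCE A (Python) =====
-- def delete_task_by_id(task_list, task_id):
--     """Deletes a task by ID."""
--     deleted = False
--     updated_task_list = []
--     for task in task_list:
--         if task["id"] == task_id:
--             deleted = True
--         else:
--             updated_task_list.append(task)
--     return updated_task_list, deleted
-- ===== SOURCE B (Python) =====
-- def delete_task_by_id(task_list, task_id):
--     """Deletes a task by ID (structural recursion on the list)."""
--     if not task_list:
--         return [], False
--     head = task_list[0]
--     rest_updated, rest_deleted = delete_task_by_id(task_list[1:], task_id)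
--     if head["id"] == task_id:
--         return rest_updated, True
--     return [head] + rest_updated, rest_deleted
-- ===== Notes on version B (the rewrite author's own statement) =====
-- stated objective: alternative
-- what changed: Replaces the iterative accumulate-with-flag loop by structural recursion on the list: the result for the tail is computed first and the head is either dropped (setting the flag) or prepended, so the output is assembled back-to-front with no mutable accumulator or flag variable.
-- outside the precondition, e.g. on delete_task_by_id([{'name': 'a'}], '1'): A raises KeyError, B raises KeyError
import Mathlib
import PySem

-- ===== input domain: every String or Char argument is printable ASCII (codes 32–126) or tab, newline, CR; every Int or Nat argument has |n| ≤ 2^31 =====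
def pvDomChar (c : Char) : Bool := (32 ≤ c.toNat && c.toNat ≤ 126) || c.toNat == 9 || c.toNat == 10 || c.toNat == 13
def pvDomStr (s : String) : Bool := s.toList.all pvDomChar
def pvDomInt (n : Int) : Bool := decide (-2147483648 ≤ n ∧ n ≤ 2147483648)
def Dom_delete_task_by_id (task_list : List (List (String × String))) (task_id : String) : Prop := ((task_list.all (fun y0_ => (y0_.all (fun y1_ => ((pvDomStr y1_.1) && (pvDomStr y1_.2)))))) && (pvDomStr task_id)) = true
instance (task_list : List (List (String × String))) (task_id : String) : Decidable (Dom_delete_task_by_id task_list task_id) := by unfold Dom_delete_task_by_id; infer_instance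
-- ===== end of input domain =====

-- B replaces A's iterative accumulate-with-flag loop by structural recursion that assembles the result back-to-front (objective: alternative).

-- task["id"]: first match in the association list; none = KeyError (excluded by Pre_)
def pvIdGet? (task : List (String × String)) : Option String :=
  (task.find? (fun kv => kv.1 == "id")).map Prod.snd

-- ===== PORT A =====
def delete_task_by_id (task_list : List (List (String × String))) (task_id : String) : (List (List (String × String))) × Bool :=
  let r := task_list.foldl
    (fun (acc : (List (List (String × String))) × Bool) task =>
      if (pvIdGet? task).getD "" == task_id then (acc.1, true)
      else (acc.1 ++ [task], acc.2))
    ([], false)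
  r

-- ===== PORT B =====
def delete_task_by_id_alt (task_list : List (List (String × String))) (task_id : String) : (List (List (String × String))) × Bool :=
  match task_list with
  | [] => ([], false)
  | head :: rest =>
    let r := delete_task_by_id_alt rest task_id
    if (pvIdGet? head).getD "" == task_id then (r.1, true)
    else (head :: r.1, r.2)

-- ===== PRECONDITION & SPEC =====
-- Pre_ excludes exactly the tasks without an "id" key, on which Python's task["id"] raises KeyError (in both A and B).
def Pre_delete_task_by_id (task_list : List (List (String × String))) (task_id : String) : Prop :=
  task_list.all (fun task => (pvIdGet? task).isSome) = true
instance (task_list : List (List (String × String))) (task_id : String) : Decidable (Pre_delete_task_by_id task_list task_id) := by unfold Pre_delete_task_by_id; infer_instance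

def pvWitness_delete_task_by_id : (List (List (String × String))) × String :=
  ([[("id", "1"), ("name", "a")], [("id", "2"), ("name", "b")]], "1")

def Spec_delete_task_by_id (task_list : List (List (String × String))) (task_id : String) (out : (List (List (String × String))) × Bool) : Prop := out = delete_task_by_id_alt task_list task_id
instance (task_list : List (List (String × String))) (task_id : String) (out : (List (List (String × String))) × Bool) : Decidable (Spec_delete_task_by_id task_list task_id out) := by unfold Spec_delete_task_by_id; infer_instance

-- ===== CLAIM (what is proved, stated in full; the proofs are below) =====
def Claim_equal_delete_task_by_id : Prop := ∀ (task_list : List (List (String × String))) (task_id : String), Dom_delete_task_by_id task_list task_id → Pre_delete_task_by_id task_list task_id → Spec_delete_task_by_id task_list task_id (delete_task_by_id task_list task_id)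

-- ===== LEMMAS AND PROOFS =====

-- A's fold with a general accumulator, characterised against B's recursion.
theorem pv_foldl_eq (task_id : String) (l : List (List (String × String)))
    (acc : List (List (String × String))) (b : Bool) :
    l.foldl (fun (acc : (List (List (String × String))) × Bool) task =>
        if (pvIdGet? task).getD "" == task_id then (acc.1, true)
        else (acc.1 ++ [task], acc.2)) (acc, b)
      = (acc ++ (delete_task_by_id_alt l task_id).1,
         b || (delete_task_by_id_alt l task_id).2) := by
  induction l generalizing acc b with
  | nil => simp [delete_task_by_id_alt]
  | cons t ts ih =>
    rw [List.foldl_cons]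
    by_cases h : ((pvIdGet? t).getD "" == task_id) = true
    · rw [if_pos h, ih]
      simp [delete_task_by_id_alt, h]
    · rw [if_neg h, ih]
      simp [delete_task_by_id_alt, h]

-- ===== VERDICT (by name: the statement is the Claim_ definition above) =====
theorem delete_task_by_id_spec : Claim_equal_delete_task_by_id := by
  intro task_list task_id _ _
  show _ = _
  rw [delete_task_by_id]
  simp only [pv_foldl_eq, List.nil_append, Bool.false_or]
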